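-- pv_equiv track=rewrite | github.com/kartiks22/2.0.4.8. | main.py | make_block_list
-- ===== SOURCE A (Python) =====
-- h = 50
--
-- w = 50
--
-- m = 8
--
-- def make_block_list(x,y,blocks_list):
-- 	x=8
-- 	y=8
-- 	number = 0
-- 	state=0
-- 	value=0
--
-- 	for i in range(4):
-- 		for j in range(4):
-- 			k=[number,i,j,x,y,state,value]
-- 			blocks_list.append(k)
-- 			number +=1
-- 			x=x+w+m
-- 		x=8
-- 		y=y+h+m
-- 	return blocks_list
-- ===== SOURCE B (Python) =====
-- h = 50
--
-- w = 50
--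
-- m = 8
--
-- def make_block_list(x, y, blocks_list):
--     # single flat pass: row/column and coordinates in closed form from n
--     for n in range(16):
--         i, j = divmod(n, 4)
--         blocks_list.append([n, i, j, 8 + j * (w + m), 8 + i * (h + m), 0, 0])
--     return blocks_list
-- ===== Notes on version B (the rewrite author's own statement) =====
-- stated objective: simpler
-- what changed: Replaces the nested i/j loops threading running x, y and number accumulators with one flat loop over n in range(16), deriving i, j by divmod and the coordinates by closed-form arithmetic.
import Mathlib
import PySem

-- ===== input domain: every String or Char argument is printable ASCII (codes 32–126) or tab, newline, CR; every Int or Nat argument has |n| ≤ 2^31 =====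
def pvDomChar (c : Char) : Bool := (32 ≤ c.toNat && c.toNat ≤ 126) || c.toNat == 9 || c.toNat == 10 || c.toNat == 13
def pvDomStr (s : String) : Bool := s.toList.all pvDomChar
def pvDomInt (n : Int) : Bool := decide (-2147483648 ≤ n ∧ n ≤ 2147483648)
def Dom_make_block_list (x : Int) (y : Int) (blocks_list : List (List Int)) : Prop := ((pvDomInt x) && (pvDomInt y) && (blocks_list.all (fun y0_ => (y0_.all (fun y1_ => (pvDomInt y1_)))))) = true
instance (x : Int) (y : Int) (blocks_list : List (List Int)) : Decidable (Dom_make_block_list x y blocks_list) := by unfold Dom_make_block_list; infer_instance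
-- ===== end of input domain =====

-- B replaces the nested loops with one flat closed-form pass; both mutate blocks_list in
-- Python by appending (equivalence here is about the returned value).
-- ===== PORT A =====
-- port of A: nested for-loops over range(4), threading (blocks_list, number, x, y) state;
-- state = value = 0 throughout; parameters x, y are overwritten to 8 before the loops.
def make_block_list (x : Int) (y : Int) (blocks_list : List (List Int)) : List (List Int) :=
  let _ := x; let _ := y
  let x : Int := 8
  let y : Int := 8
  let number : Int := 0
  let state : Int := 0
  let value : Int := 0
  let res :=
    (List.range 4).foldl (fun (st : List (List Int) × Int × Int × Int) i =>
      let st2 :=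
        (List.range 4).foldl (fun (st : List (List Int) × Int × Int × Int) j =>
          let (bl, number, x, y) := st
          let k : List Int := [number, (i : Int), (j : Int), x, y, state, value]
          (bl ++ [k], number + 1, x + 50 + 8, y)) st
      let (bl, number, _, y) := st2
      (bl, number, (8 : Int), y + 50 + 8)) (blocks_list, number, x, y)
  res.1

-- ===== PORT B =====
-- port of B: one flat loop over range(16); i = n // 4, j = n % 4, coordinates closed-form.
def make_block_list_alt (x : Int) (y : Int) (blocks_list : List (List Int)) : List (List Int) :=
  (List.range 16).foldl (fun bl n =>
    let i : Int := PySem.Int.floordiv (n : Int) 4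
    let j : Int := PySem.Int.mod (n : Int) 4
    bl ++ [[(n : Int), i, j, 8 + j * (50 + 8), 8 + i * (50 + 8), 0, 0]]) blocks_list
-- ===== PRECONDITION & SPEC =====
def Spec_make_block_list (x : Int) (y : Int) (blocks_list : List (List Int)) (out : List (List Int)) : Prop := out = make_block_list_alt x y blocks_list
instance (x : Int) (y : Int) (blocks_list : List (List Int)) (out : List (List Int)) : Decidable (Spec_make_block_list x y blocks_list out) := by unfold Spec_make_block_list; infer_instance

-- ===== CLAIM (what is proved, stated in full; the proofs are below) =====
def Claim_equal_make_block_list : Prop := ∀ (x : Int) (y : Int) (blocks_list : List (List Int)), Dom_make_block_list x y blocks_list → Spec_make_block_list x y blocks_list (make_block_list x y blocks_list)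

-- ===== LEMMAS AND PROOFS =====

-- ===== VERDICT (by name: the statement is the Claim_ definition above) =====
theorem make_block_list_spec : Claim_equal_make_block_list := by
  intro x y bl _
  unfold Spec_make_block_list
  simp [make_block_list, make_block_list_alt, List.range, List.range.loop,
        PySem.Int.floordiv, PySem.Int.mod]
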